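-- pv_equiv track=rewrite | github.com/pirondibr/repediu-seo-relatorios-2026 | parse_semrush_v2.py | parse_rows_from_cells
-- ===== SOURCE A (Python) =====
-- def parse_rows_from_cells(cells):
--     """Group flat gridcell values into rows of 8 or 9 cells.
--
--     A row ends with a URL cell that starts with "repediu.com.br".
--     """
--     rows = []
--     current = []
--     for c in cells:
--         current.append(c)
--         if c.startswith("repediu.com.br") or c == "repediu.com.br/":
--             rows.append(current)
--             current = []
--     return rows
-- ===== SOURCE B (Python) =====
-- def parse_rows_from_cells(cells):
--     """Group flat gridcell values into rows of 8 or 9 cells.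
--
--     A row ends with a URL cell that starts with "repediu.com.br".
--     Recursive decomposition: split off the prefix up to the first
--     terminator cell and recurse on the remainder.
--     """
--     xs = list(cells)
--     for i, c in enumerate(xs):
--         if c.startswith("repediu.com.br"):
--             return [xs[:i + 1]] + parse_rows_from_cells(xs[i + 1:])
--     return []
-- ===== Notes on version B (the rewrite author's own statement) =====
-- stated objective: alternative
-- what changed: Replaces A's single fold with a running 'current' accumulator by a recursive decomposition that finds the first terminator cell and slices the row off the front, recursing on the remainder; the redundant equality test against 'repediu.com.br/' (subsumed by startswith) is dropped.
import Mathlib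
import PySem

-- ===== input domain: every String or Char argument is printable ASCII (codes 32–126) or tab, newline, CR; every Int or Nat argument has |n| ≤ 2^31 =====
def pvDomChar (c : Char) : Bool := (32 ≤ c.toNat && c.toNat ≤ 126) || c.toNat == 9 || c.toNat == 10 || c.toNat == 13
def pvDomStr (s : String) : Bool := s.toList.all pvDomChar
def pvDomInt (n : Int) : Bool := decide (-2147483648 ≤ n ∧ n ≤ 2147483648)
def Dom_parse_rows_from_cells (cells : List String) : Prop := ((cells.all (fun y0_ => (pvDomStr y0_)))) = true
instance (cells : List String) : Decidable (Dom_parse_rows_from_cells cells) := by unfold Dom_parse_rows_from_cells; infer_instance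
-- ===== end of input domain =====

-- B replaces A's fold-with-accumulator by recursion that slices each row off the front (alternative decomposition, same cost).

-- ===== PORT A =====
def parse_rows_from_cells (cells : List String) : List (List String) :=
  (cells.foldl
    (fun (st : List (List String) × List String) c =>
      let current := st.2 ++ [c]
      if PySem.Str.startswith c "repediu.com.br" || (c == "repediu.com.br/") then
        (st.1 ++ [current], ([] : List String))
      else
        (st.1, current))
    (([] : List (List String)), ([] : List String))).1

-- ===== PORT B =====
-- the terminator predicate of Source B
def pvIsTerm (c : String) : Bool := PySem.Str.startswith c "repediu.com.br"

-- Source B: scan for the first terminator (enumerate + startswith); slice xs[:i+1] and recurse on xs[i+1:]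
def parse_rows_from_cells_alt (xs : List String) : List (List String) :=
  match h : xs.findIdx? pvIsTerm with
  | some i => xs.take (i + 1) :: parse_rows_from_cells_alt (xs.drop (i + 1))
  | none => []
termination_by xs.length
decreasing_by
  cases xs with
  | nil => simp [List.findIdx?, List.findIdx?.go] at h
  | cons a as => simp

-- ===== PRECONDITION & SPEC =====
def Spec_parse_rows_from_cells (cells : List String) (out : List (List String)) : Prop := out = parse_rows_from_cells_alt cells
instance (cells : List String) (out : List (List String)) : Decidable (Spec_parse_rows_from_cells cells out) := by unfold Spec_parse_rows_from_cells; infer_instance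

-- ===== CLAIM (what is proved, stated in full; the proofs are below) =====
def Claim_equal_parse_rows_from_cells : Prop := ∀ (cells : List String), Dom_parse_rows_from_cells cells → Spec_parse_rows_from_cells cells (parse_rows_from_cells cells)

-- ===== LEMMAS AND PROOFS =====

-- A's combined test equals Source B's test: equality with "repediu.com.br/" implies the prefix test.
theorem pvTerm_eq (c : String) :
    (PySem.Str.startswith c "repediu.com.br" || (c == "repediu.com.br/")) = pvIsTerm c := by
  unfold pvIsTerm
  by_cases hc : c = "repediu.com.br/"
  · subst hc; decide
  · simp [hc]

-- A's loop body, with the test rewritten through pvTerm_eq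
def pvStep (st : List (List String) × List String) (c : String) :
    List (List String) × List String :=
  if pvIsTerm c then (st.1 ++ [st.2 ++ [c]], ([] : List String)) else (st.1, st.2 ++ [c])

theorem pvStep_eq :
    (fun (st : List (List String) × List String) c =>
      let current := st.2 ++ [c]
      if PySem.Str.startswith c "repediu.com.br" || (c == "repediu.com.br/") then
        (st.1 ++ [current], ([] : List String))
      else
        (st.1, current)) = pvStep := by
  funext st c
  simp only [pvStep, pvTerm_eq]

-- structural reference version of A's loop: recursion over the cells with the 'current' accumulator
def pvGoAux (current : List String) : List String → List (List String)
  | [] => []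
  | c :: xs =>
    if pvIsTerm c then (current ++ [c]) :: pvGoAux [] xs
    else pvGoAux (current ++ [c]) xs

theorem pvFoldA (xs : List String) (rows : List (List String)) (current : List String) :
    (xs.foldl pvStep (rows, current)).1 = rows ++ pvGoAux current xs := by
  induction xs generalizing rows current with
  | nil => simp [pvGoAux]
  | cons c xs ih =>
    rw [List.foldl_cons]
    by_cases h : pvIsTerm c = true
    · rw [show pvStep (rows, current) c = (rows ++ [current ++ [c]], []) from by
        simp [pvStep, h], ih]
      simp [pvGoAux, h]
    · rw [show pvStep (rows, current) c = (rows, current ++ [c]) from by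
        simp [pvStep, h], ih]
      simp [pvGoAux, h]

-- unfolding equation for parse_rows_from_cells_alt
theorem pvAlt_eq (xs : List String) :
    parse_rows_from_cells_alt xs =
      match xs.findIdx? pvIsTerm with
      | some i => xs.take (i + 1) :: parse_rows_from_cells_alt (xs.drop (i + 1))
      | none => [] := by
  rw [parse_rows_from_cells_alt.eq_def]
  cases hfi : xs.findIdx? pvIsTerm <;> simp

theorem pvGoAux_eq (xs : List String) (current : List String) :
    pvGoAux current xs =
      match xs.findIdx? pvIsTerm with
      | some i => (current ++ xs.take (i + 1)) :: parse_rows_from_cells_alt (xs.drop (i + 1))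
      | none => [] := by
  induction xs generalizing current with
  | nil => simp [pvGoAux]
  | cons c xs ih =>
    by_cases h : pvIsTerm c = true
    · simp only [pvGoAux, h, List.findIdx?_cons]
      rw [ih ([] : List String)]
      simp only [List.nil_append]
      rw [← pvAlt_eq xs]
      simp
    · simp only [pvGoAux, h, List.findIdx?_cons]
      rw [ih (current ++ [c])]
      cases hfi : xs.findIdx? pvIsTerm with
      | none => simp
      | some i => simp [List.take_succ_cons, List.drop_succ_cons]

-- ===== VERDICT (by name: the statement is the Claim_ definition above) =====
theorem parse_rows_from_cells_spec : Claim_equal_parse_rows_from_cells := by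
  intro cells _
  unfold Spec_parse_rows_from_cells parse_rows_from_cells
  rw [pvStep_eq, pvFoldA, List.nil_append, pvGoAux_eq, pvAlt_eq]
  cases cells.findIdx? pvIsTerm <;> simp
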